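-- pv_equiv track=rewrite | github.com/mikiyas-degefu/A2SV_competitive_programming | A2SV Remote Education Contest #10 23-Apr-2025/B - Friends - The Last One 339569.py | solve
-- ===== SOURCE A (Python) =====
-- def solve(n,m,a):
--     if n > m: return "NO"
--
--     a.sort(reverse=True)
--     space = 0
--     prev = 0
--
--
--     for num in range(n):
--         if prev - a[num] >= 0:
--             space += a[num] + 1
--         else:
--             space += ((a[num] * 2) + 1)
--
--         prev = a[num]
--
--     if a[0] - a[-1] >= 0:
--         space -= a[-1]
--     if space > m:
--         return "NO"
--     else:
--         return "YES"
-- ===== SOURCE B (Python) =====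
-- def solve(n, m, a):
--     # Closed form over the sorted list: each of the first n friends needs
--     # its height plus one slot, the tallest (if positive) doubles, and the
--     # globally smallest element is refunded.  Sorts `a` in place, like A.
--     if n > m:
--         return "NO"
--     a.sort(reverse=True)
--     space = sum(a[:n]) + n + (a[0] if a[0] > 0 else 0) - a[-1]
--     return "NO" if space > m else "YES"
-- ===== Notes on version B (the rewrite author's own statement) =====
-- stated objective: simpler
-- what changed: B replaces A's per-element conditional loop and the final a[0]-a[-1] test with one closed-form expression (after the descending sort only the first element can take the else-branch); Pre_ excludes empty a and n > len(a), where A raises IndexError, and nonpositive n, which is outside the problem's natural domain (n counts friends) and where A's empty-loop value is accidental.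
-- outside the precondition, e.g. on solve(0, 1, [5, 3]): A returns 'YES', B returns 'NO'; on solve(-1, 0, [3, 1]): A returns 'YES', B returns 'NO'
import Mathlib
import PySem

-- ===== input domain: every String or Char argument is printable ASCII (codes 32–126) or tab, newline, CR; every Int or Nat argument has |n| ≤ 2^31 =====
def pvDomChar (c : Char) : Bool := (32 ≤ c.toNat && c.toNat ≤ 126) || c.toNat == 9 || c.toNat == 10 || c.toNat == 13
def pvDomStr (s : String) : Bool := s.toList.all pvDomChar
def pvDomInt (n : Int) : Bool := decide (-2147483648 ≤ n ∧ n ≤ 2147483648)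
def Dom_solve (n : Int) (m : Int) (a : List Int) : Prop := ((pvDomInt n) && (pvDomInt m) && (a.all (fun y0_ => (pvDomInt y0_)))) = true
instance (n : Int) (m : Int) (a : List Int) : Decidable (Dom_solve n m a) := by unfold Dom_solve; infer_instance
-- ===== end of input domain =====

-- B collapses A's per-element loop into one closed-form expression over the sorted list (objective: simpler).
-- Both A and B sort the Python list argument in place; the equivalence proved here is about the return value.

-- ===== PORT A =====
-- loop body of A: given state (space, prev) and the fetched element x, update it
def stepA (st : Int × Int) (x : Int) : Int × Int :=
  (if st.2 - x ≥ 0 then st.1 + (x + 1) else st.1 + (x * 2 + 1), x)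

def solve (n : Int) (m : Int) (a : List Int) : String :=
  if n > m then "NO" else
    let s := PySem.List.sorted a (fun x => x) true
    -- a[num]: Pre_solve guarantees every index of range(n) is in range (default never used)
    let st := (PySem.List.pyRange 0 n 1).foldl
      (fun st num => stepA st (PySem.List.pyGetD s num 0)) (0, 0)
    let space := if PySem.List.pyGetD s 0 0 - PySem.List.pyGetD s (-1) 0 ≥ 0
      then st.1 - PySem.List.pyGetD s (-1) 0 else st.1
    if space > m then "NO" else "YES"

-- ===== PORT B =====
def solve_alt (n : Int) (m : Int) (a : List Int) : String :=
  if n > m then "NO" else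
    let s := PySem.List.sorted a (fun x => x) true
    -- a[0], a[-1]: Pre_solve guarantees a ≠ [] here (defaults never used)
    let h0 := PySem.List.pyGetD s 0 0
    let space := (PySem.List.slice s none (some n)).sum + n
      + (if h0 > 0 then h0 else 0) - PySem.List.pyGetD s (-1) 0
    if space > m then "NO" else "YES"

-- ===== PRECONDITION & SPEC =====
-- Pre_ excludes empty a and n > len(a) (A raises IndexError past the n > m return) and nonpositive n,
-- which is outside the problem's natural domain (n counts friends).
def Pre_solve (n : Int) (m : Int) (a : List Int) : Prop :=
  m < n ∨ (1 ≤ n ∧ n ≤ (a.length : Int))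
instance (n : Int) (m : Int) (a : List Int) : Decidable (Pre_solve n m a) := by
  unfold Pre_solve; infer_instance
def pvWitness_solve : Int × Int × List Int := (2, 5, [1, 2, 3])

def Spec_solve (n : Int) (m : Int) (a : List Int) (out : String) : Prop := out = solve_alt n m a
instance (n : Int) (m : Int) (a : List Int) (out : String) : Decidable (Spec_solve n m a out) := by unfold Spec_solve; infer_instance

-- ===== CLAIM (what is proved, stated in full; the proofs are below) =====
def Claim_equal_solve : Prop := ∀ (n : Int) (m : Int) (a : List Int), Dom_solve n m a → Pre_solve n m a → Spec_solve n m a (solve n m a)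

-- ===== LEMMAS AND PROOFS =====

-- On a descending tail, the loop body always takes the then-branch: the fold is a running sum.
lemma loopA_closed (l : List Int) (prev space : Int)
    (h : (prev :: l).Pairwise (fun p q => q ≤ p)) :
    l.foldl stepA (space, prev)
      = (space + l.sum + l.length, (prev :: l).getLast (by simp)) := by
  induction l generalizing prev space with
  | nil => simp
  | cons x xs ih =>
    have hx : x ≤ prev := (List.pairwise_cons.mp h).1 x (by simp)
    have h2 : (x :: xs).Pairwise (fun p q => q ≤ p) := (List.pairwise_cons.mp h).2
    simp only [List.foldl_cons, stepA, if_pos (by omega : prev - x ≥ 0)]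
    rw [ih x (space + (x + 1)) h2]
    simp [List.getLast_cons]
    ring

theorem solve_spec : Claim_equal_solve := by
  intro n m a _ hpre
  unfold Spec_solve solve solve_alt
  by_cases hnm : n > m
  · simp [hnm]
  · simp only [if_neg hnm]
    obtain ⟨hn, hlen⟩ : 1 ≤ n ∧ n ≤ (a.length : Int) := by
      rcases hpre with h | h
      · omega
      · exact h
    set s := PySem.List.sorted a (fun x => x) true with hs
    have hsne : s ≠ [] := by
      intro hcon
      have : a = [] := (PySem.List.sorted_eq_nil_iff ..).mp hcon
      subst this; simp at hlen; omega
    have hslen : s.length = a.length := PySem.List.length_sorted ..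
    have hpw : s.Pairwise (fun p q => q ≤ p) := PySem.List.sorted_pairwise_rev ..
    obtain ⟨s0, rest, hsc⟩ := List.exists_cons_of_ne_nil hsne
    have hlast_mem : s.getLast hsne ∈ s := List.getLast_mem hsne
    have hhead_ge : s.getLast hsne ≤ s0 := by
      have hmem' : s.getLast hsne ∈ s0 :: rest := hsc ▸ hlast_mem
      rcases List.mem_cons.mp hmem' with h0 | hmem
      · omega
      · have := List.pairwise_cons.mp (hsc ▸ hpw)
        exact this.1 _ hmem
    have hget0 : PySem.List.pyGetD s 0 0 = s0 := by rw [hsc]; exact PySem.List.pyGetD_zero_cons ..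
    have hgetm1 : PySem.List.pyGetD s (-1) 0 = s.getLast hsne := PySem.List.pyGetD_neg_one s 0 hsne
    have hnlen : n.toNat ≤ s.length := by omega
    set t := s.take n.toNat with ht
    have htlen : t.length = n.toNat := by
      rw [ht, List.length_take]; omega
    -- fold over range = fold over the taken prefix
    have hrange : (PySem.List.pyRange 0 n 1).foldl
        (fun st num => stepA st (PySem.List.pyGetD s num 0)) (0, 0)
        = t.foldl stepA (0, 0) := by
      have hne : n = (t.length : Int) := by rw [htlen]; omega
      rw [hne]
      rw [PySem.List.foldl_congr_mem _ _ (fun st num => stepA st (PySem.List.pyGetD t num 0)) _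
        (by
          intro acc j hj
          rw [PySem.List.mem_pyRange_one] at hj
          congr 1
          rw [PySem.List.pyGetD_eq_getElem s 0 hj.1 (by omega),
              PySem.List.pyGetD_eq_getElem t 0 hj.1 (by omega)]
          simp only [ht, List.getElem_take])]
      exact PySem.List.foldl_pyRange_zero_pyGetD' t 0 stepA (0, 0)
    rw [hrange]
    -- evaluate the fold on t = s0 :: rest.take (n.toNat - 1)
    obtain ⟨k1, hk1⟩ : ∃ k1, n.toNat = k1 + 1 := ⟨n.toNat - 1, by omega⟩
    set r := rest.take k1 with hr
    have htc : t = s0 :: r := by rw [ht, hsc, hk1, List.take_succ_cons]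
    have hrlen : r.length = k1 := by
      rw [hr, List.length_take]
      have : rest.length = s.length - 1 := by rw [hsc]; simp
      omega
    have hpw2 : (s0 :: r).Pairwise (fun p q => q ≤ p) := by
      refine List.Pairwise.sublist ?_ (hsc ▸ hpw)
      exact List.Sublist.cons₂ s0 (List.take_sublist _ _)
    have hfold : t.foldl stepA (0, 0)
        = (((if (0:Int) - s0 ≥ 0 then 0 + (s0 + 1) else 0 + (s0 * 2 + 1)) + r.sum + r.length : Int),
           (s0 :: r).getLast (by simp)) := by
      rw [htc, List.foldl_cons]
      show r.foldl stepA (stepA (0,0) s0) = _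
      have : stepA (0, 0) s0
          = (if (0:Int) - s0 ≥ 0 then 0 + (s0 + 1) else 0 + (s0 * 2 + 1), s0) := by
        unfold stepA; split_ifs <;> rfl
      rw [this, loopA_closed r s0 _ hpw2]
    rw [hfold]
    -- B side: slice = t
    rw [PySem.List.slice_to s (by omega : (0:Int) ≤ n)]
    rw [← ht, htc]
    simp only [hget0, hgetm1, List.sum_cons]
    have hrI : (r.length : Int) = k1 := by omega
    have hnI : n = (k1 : Int) + 1 := by omega
    split_ifs <;> first | rfl | (exfalso; omega)
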